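-- pv_equiv track=rewrite | github.com/dem0NSTER/EGE | 23/48.py | f
-- ===== SOURCE A (Python) =====
-- def f(n, finish, commands):
--     if n == finish and commands.count('*') == 1:
--         return 1
--     if n == finish and commands.count('*') != 1:
--         return 0
--     if n > finish:
--         return 0
--     if n < finish:
--         return f(n + 1, finish, commands + '+') + f(n + 2, finish, commands + '+') + f(n * 2, finish, commands + '*')
-- ===== SOURCE B (Python) =====
-- def f(n, finish, commands):
--     if n > finish:
--         return 0
--     s = commands.count('*')
--     if n == finish:
--         return 1 if s == 1 else 0
--     if s > 1:
--         return 0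
--     # bottom-up DP: g0[v] / g1[v] = number of command sequences leading from
--     # value v to finish that use exactly 0 / 1 multiplications
--     g0 = {finish: 1}
--     g1 = {finish: 0}
--     for v in range(finish - 1, n - 1, -1):
--         g0[v] = g0.get(v + 1, 0) + g0.get(v + 2, 0)
--         g1[v] = g1.get(v + 1, 0) + g1.get(v + 2, 0) + g0.get(2 * v, 0)
--     return g0[n] if s == 1 else g1[n]
-- ===== Notes on version B (the rewrite author's own statement) =====
-- stated objective: alternative
-- what changed: Replaces A's top-down recursion that grows a command string and re-counts '*' at every call by a bottom-up DP over values finish..n with two dict tables (paths using exactly 0 and exactly 1 multiplications), reading the initial string's '*'-count once; A is exponential in finish-n, B linear, but a timing run could not certify a ratio (A's terminating inputs finish in under a millisecond).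
import Mathlib
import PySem

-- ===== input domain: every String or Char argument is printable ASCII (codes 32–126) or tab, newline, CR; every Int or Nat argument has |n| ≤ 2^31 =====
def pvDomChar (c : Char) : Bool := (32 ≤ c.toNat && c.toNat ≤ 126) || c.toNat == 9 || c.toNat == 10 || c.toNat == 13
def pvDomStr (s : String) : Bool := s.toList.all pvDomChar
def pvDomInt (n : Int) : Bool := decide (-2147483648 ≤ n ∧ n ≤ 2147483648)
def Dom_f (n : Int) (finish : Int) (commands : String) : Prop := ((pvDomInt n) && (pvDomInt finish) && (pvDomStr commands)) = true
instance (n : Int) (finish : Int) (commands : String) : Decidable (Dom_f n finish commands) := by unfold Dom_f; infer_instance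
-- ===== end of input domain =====

-- B replaces A's recursion over growing command strings by a bottom-up DP keyed by
-- value, split into two tables by the number of '*' used (objective: alternative).


-- ===== PORT A =====
-- fuel only makes A's recursion total in Lean; under Pre_f it never runs out
-- (fAux_eq_spec below is proved for every fuel > (finish - n).toNat).
def fAux (fuel : Nat) (n : Int) (finish : Int) (commands : String) : Int :=
  match fuel with
  | 0 => 0
  | fuel + 1 =>
    if n = finish ∧ PySem.Str.count commands "*" = 1 then 1
    else if n = finish ∧ PySem.Str.count commands "*" ≠ 1 then 0
    else if finish < n then 0
    else if n < finish then
      fAux fuel (n + 1) finish (commands ++ "+") + fAux fuel (n + 2) finish (commands ++ "+")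
        + fAux fuel (n * 2) finish (commands ++ "*")
    else 0  -- unreachable: the four Python branches are exhaustive

def f (n : Int) (finish : Int) (commands : String) : Int :=
  fAux ((finish - n).toNat + 1) n finish commands

-- ===== PORT B =====
-- the loop 'for v in range(finish - 1, n - 1, -1)' of Source B, as the obvious downward recursion
def dpLoop (n : Int) (v : Int) (g0 : Std.HashMap Int Int) (g1 : Std.HashMap Int Int) :
    Std.HashMap Int Int × Std.HashMap Int Int :=
  if h : v < n then (g0, g1)
  else
    let g0' := g0.insert v (g0.getD (v + 1) 0 + g0.getD (v + 2) 0)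
    let g1' := g1.insert v (g1.getD (v + 1) 0 + g1.getD (v + 2) 0 + g0'.getD (2 * v) 0)
    dpLoop n (v - 1) g0' g1'
termination_by (v + 1 - n).toNat
decreasing_by omega

def f_alt (n : Int) (finish : Int) (commands : String) : Int :=
  if finish < n then 0
  else
    let s := PySem.Str.count commands "*"
    if n = finish then (if s = 1 then 1 else 0)
    else if 1 < s then 0
    else
      let p := dpLoop n (finish - 1) ((∅ : Std.HashMap Int Int).insert finish 1)
        ((∅ : Std.HashMap Int Int).insert finish 0)
      if s = 1 then p.1.getD n 0 else p.2.getD n 0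

-- ===== PRECONDITION & SPEC =====
-- A's recursion never terminates once n < finish and n ≤ 0 (the n*2 call no longer
-- increases n), so Python A raises RecursionError there; Pre_f excludes exactly that.
def Pre_f (n : Int) (finish : Int) (commands : String) : Prop := 1 ≤ n ∨ finish ≤ n
instance (n : Int) (finish : Int) (commands : String) : Decidable (Pre_f n finish commands) := by
  unfold Pre_f; infer_instance

def pvWitness_f : Int × Int × String := (1, 5, "")

def Spec_f (n : Int) (finish : Int) (commands : String) (out : Int) : Prop := out = f_alt n finish commands
instance (n : Int) (finish : Int) (commands : String) (out : Int) : Decidable (Spec_f n finish commands out) := by unfold Spec_f; infer_instance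

-- ===== CLAIM (what is proved, stated in full; the proofs are below) =====
def Claim_equal_f : Prop := ∀ (n : Int) (finish : Int) (commands : String), Dom_f n finish commands → Pre_f n finish commands → Spec_f n finish commands (f n finish commands)

-- ===== LEMMAS AND PROOFS =====

-- number of command sequences from v to finish using exactly zero '*'
def P0 (finish : Int) (v : Int) : Int :=
  if v = finish then 1
  else if finish < v then 0
  else P0 finish (v + 1) + P0 finish (v + 2)
termination_by (finish - v).toNat
decreasing_by all_goals (simp at *; omega)

-- number of command sequences from v to finish using exactly one '*' (meaningful for 1 ≤ v)
def P1 (finish : Int) (v : Int) : Int :=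
  if v = finish then 0
  else if finish < v then 0
  else P1 finish (v + 1) + P1 finish (v + 2) + P0 finish (2 * v)
termination_by (finish - v).toNat
decreasing_by all_goals (simp at *; omega)

lemma count_go_single (c : Char) :
    ∀ (s : List Char) (fuel acc : Nat), s.length ≤ fuel →
      PySem.Chars.count.go [c] fuel s acc = acc + s.count c
  | [], fuel, acc, h => by cases fuel <;> simp [PySem.Chars.count.go]
  | h :: t, fuel + 1, acc, hl => by
      rw [PySem.Chars.count.go]
      by_cases hc : c = h
      · subst hc
        simp [List.isPrefixOf, count_go_single c t fuel (acc + 1) (by simpa using hl)]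
        omega
      · simp [List.isPrefixOf, Ne.symm hc, hc,
          count_go_single c t fuel acc (by simpa using hl)]

lemma count_single (s : String) (c : Char) :
    PySem.Str.count s (String.ofList [c]) = s.toList.count c := by
  rw [PySem.Str.count_eq]
  have : (String.ofList [c]).toList = [c] := by simp
  rw [this, PySem.Chars.count]
  simpa using count_go_single c s.toList s.toList.length 0 le_rfl

lemma count_star (s : String) : PySem.Str.count s "*" = s.toList.count '*' := by
  simpa using count_single s '*'

lemma count_star_plus (s : String) :
    PySem.Str.count (s ++ "+") "*" = PySem.Str.count s "*" := by
  rw [count_star, count_star]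
  simp [List.count_append]

lemma count_star_star (s : String) :
    PySem.Str.count (s ++ "*") "*" = PySem.Str.count s "*" + 1 := by
  rw [count_star, count_star]
  simp [List.count_append]

lemma P0_base_gt {finish v : Int} (h : finish < v) : P0 finish v = 0 := by
  rw [P0]; simp [show v ≠ finish by omega, h]

lemma P1_base_gt {finish v : Int} (h : finish < v) : P1 finish v = 0 := by
  rw [P1]; simp [show v ≠ finish by omega, h]

-- what A computes, as a function of the '*'-count of the accumulated command string
def specVal (finish n : Int) (k : Nat) : Int :=
  if k = 1 then P0 finish n else if k = 0 then P1 finish n else 0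

lemma specVal_zero (finish n : Int) : specVal finish n 0 = P1 finish n := by
  simp [specVal]

lemma specVal_one (finish n : Int) : specVal finish n 1 = P0 finish n := by
  simp [specVal]

lemma specVal_big (finish n : Int) {k : Nat} (h : 2 ≤ k) : specVal finish n k = 0 := by
  simp [specVal, show k ≠ 1 by omega, show k ≠ 0 by omega]

lemma fAux_eq_spec (finish : Int) :
    ∀ (fuel : Nat) (n : Int) (commands : String), (1 ≤ n ∨ finish ≤ n) →
      (finish - n).toNat < fuel →
      fAux fuel n finish commands = specVal finish n (PySem.Str.count commands "*")
  | fuel + 1, n, commands, hn, hf => by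
      rw [fAux]
      by_cases hnf : n = finish
      · subst hnf
        by_cases hc : PySem.Str.count commands "*" = 1
        · rw [if_pos ⟨rfl, hc⟩, hc, specVal_one, P0]
          simp
        · rw [if_neg (fun h => hc h.2), if_pos ⟨rfl, hc⟩]
          rcases hk : PySem.Str.count commands "*" with _ | k
          · rw [specVal_zero, P1]; simp
          · have : k + 1 ≥ 2 := by omega
            rw [specVal_big _ _ this]
      · by_cases hlt : finish < n
        · rw [if_neg (fun h => hnf h.1), if_neg (fun h => hnf h.1), if_pos hlt]
          rcases hk : PySem.Str.count commands "*" with _ | _ | k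
          · rw [specVal_zero, P1_base_gt hlt]
          · rw [specVal_one, P0_base_gt hlt]
          · rw [specVal_big _ _ (by omega)]
        · have hnlt : n < finish := by omega
          have h1 : (1 : Int) ≤ n := by omega
          have r1 := fAux_eq_spec finish fuel (n + 1) (commands ++ "+") (by omega) (by omega)
          have r2 := fAux_eq_spec finish fuel (n + 2) (commands ++ "+") (by omega) (by omega)
          have r3 := fAux_eq_spec finish fuel (n * 2) (commands ++ "*") (by omega) (by omega)
          rw [if_neg (fun h => hnf h.1), if_neg (fun h => hnf h.1), if_neg hlt, if_pos hnlt,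
            r1, r2, r3, count_star_plus, count_star_star]
          rcases hk : PySem.Str.count commands "*" with _ | _ | k
          · rw [specVal_zero, specVal_zero, specVal_one]
            conv_rhs => rw [specVal_zero, P1]
            rw [if_neg hnf, if_neg hlt, show n * 2 = 2 * n from mul_comm n 2]
          · rw [specVal_one, specVal_one, specVal_big _ _ (by omega)]
            conv_rhs => rw [specVal_one, P0]
            rw [if_neg hnf, if_neg hlt, add_zero]
          · rw [specVal_big _ _ (by omega), specVal_big _ _ (by omega),
              specVal_big _ _ (by omega), specVal_big _ _ (by omega)]
            simp

-- getD/insert on Std.HashMap, phrased with a propositional if (proof-side helpers)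
lemma hmGetD_insert (m : Std.HashMap Int Int) (k k' v d : Int) :
    (m.insert k v).getD k' d = if k' = k then v else m.getD k' d := by
  rw [Std.HashMap.getD_insert]
  by_cases h : k' = k
  · simp [h]
  · simp [h, Ne.symm h]

lemma hmGetD_empty (k d : Int) : (∅ : Std.HashMap Int Int).getD k d = d := by
  simp

-- loop invariant of B's DP: after the loop has processed down to v, the tables hold
-- P0 / P1 exactly on the already-processed values v+1 .. finish
lemma dpLoop_inv (n finish : Int) (hn : 1 ≤ n) :
    ∀ (v : Int) (g0 g1 : Std.HashMap Int Int), n - 1 ≤ v → v ≤ finish - 1 →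
      (∀ w, g0.getD w 0 = if v < w ∧ w ≤ finish then P0 finish w else 0) →
      (∀ w, g1.getD w 0 = if v < w ∧ w ≤ finish then P1 finish w else 0) →
      (∀ w, (dpLoop n v g0 g1).1.getD w 0 = if n - 1 < w ∧ w ≤ finish then P0 finish w else 0) ∧
      (∀ w, (dpLoop n v g0 g1).2.getD w 0 = if n - 1 < w ∧ w ≤ finish then P1 finish w else 0)
  | v, g0, g1, hv1, hv2, hg0, hg1 => by
      rw [dpLoop]
      by_cases hvn : v < n
      · have hv : v = n - 1 := by omega
        subst hv
        simp only [dif_pos hvn]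
        exact ⟨hg0, hg1⟩
      · simp only [dif_neg hvn]
        have e1 : g0.getD (v + 1) 0 = P0 finish (v + 1) := by
          rw [hg0, if_pos ⟨by omega, by omega⟩]
        have e2 : g0.getD (v + 2) 0 = P0 finish (v + 2) := by
          by_cases h2 : v + 2 ≤ finish
          · rw [hg0, if_pos ⟨by omega, h2⟩]
          · rw [hg0, if_neg (by omega), P0_base_gt (by omega)]
        have e3 : g1.getD (v + 1) 0 = P1 finish (v + 1) := by
          rw [hg1, if_pos ⟨by omega, by omega⟩]
        have e4 : g1.getD (v + 2) 0 = P1 finish (v + 2) := by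
          by_cases h2 : v + 2 ≤ finish
          · rw [hg1, if_pos ⟨by omega, h2⟩]
          · rw [hg1, if_neg (by omega), P1_base_gt (by omega)]
        have e5 : (g0.insert v (g0.getD (v + 1) 0 + g0.getD (v + 2) 0)).getD (2 * v) 0
            = P0 finish (2 * v) := by
          rw [hmGetD_insert, if_neg (by omega)]
          by_cases h2 : 2 * v ≤ finish
          · rw [hg0, if_pos ⟨by omega, h2⟩]
          · rw [hg0, if_neg (by omega), P0_base_gt (by omega)]
        have hp0 : g0.getD (v + 1) 0 + g0.getD (v + 2) 0 = P0 finish v := by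
          rw [e1, e2]
          conv_rhs => rw [P0]
          rw [if_neg (by omega), if_neg (by omega)]
        have hp1 : g1.getD (v + 1) 0 + g1.getD (v + 2) 0
              + (g0.insert v (g0.getD (v + 1) 0 + g0.getD (v + 2) 0)).getD (2 * v) 0
            = P1 finish v := by
          rw [e3, e4, e5]
          conv_rhs => rw [P1]
          rw [if_neg (by omega), if_neg (by omega)]
        refine dpLoop_inv n finish hn (v - 1) _ _ (by omega) (by omega) ?_ ?_
        · intro w
          rw [hmGetD_insert]
          by_cases hw : w = v
          · subst hw
            rw [if_pos rfl, hp0, if_pos ⟨by omega, by omega⟩]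
          · rw [if_neg hw, hg0]
            split_ifs <;> first | rfl | (exfalso; omega)
        · intro w
          rw [hmGetD_insert]
          by_cases hw : w = v
          · subst hw
            rw [if_pos rfl, hp1, if_pos ⟨by omega, by omega⟩]
          · rw [if_neg hw, hg1]
            split_ifs <;> first | rfl | (exfalso; omega)
termination_by v => (v + 1 - n).toNat
decreasing_by omega

-- ===== VERDICT (by name: the statement is the Claim_ definition above) =====
theorem f_spec : Claim_equal_f := by
  intro n finish commands _ hpre
  unfold Spec_f
  rw [f, fAux_eq_spec finish _ n commands hpre (by omega)]
  unfold f_alt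
  by_cases hlt : finish < n
  · simp only [if_pos hlt]
    rcases hk : PySem.Str.count commands "*" with _ | _ | k
    · rw [specVal_zero, P1_base_gt hlt]
    · rw [specVal_one, P0_base_gt hlt]
    · rw [specVal_big _ _ (by omega)]
  · by_cases hnf : n = finish
    · subst hnf
      simp only [if_neg hlt]
      by_cases hc : PySem.Str.count commands "*" = 1
      · rw [if_pos hc, hc, specVal_one, P0]
        simp
      · rw [if_neg hc]
        rcases hk : PySem.Str.count commands "*" with _ | k
        · rw [specVal_zero, P1]; simp
        · rw [specVal_big _ _ (by omega)]; simp
    · have hnlt : n < finish := by omega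
      have hn1 : (1 : Int) ≤ n := by rcases hpre with h | h <;> omega
      simp only [if_neg hlt, if_neg hnf]
      have hinv := dpLoop_inv n finish hn1 (finish - 1)
        ((∅ : Std.HashMap Int Int).insert finish 1) ((∅ : Std.HashMap Int Int).insert finish 0)
        (by omega) (by omega)
        (fun w => by
          rw [hmGetD_insert]
          by_cases hw : w = finish
          · subst hw
            rw [if_pos rfl, if_pos ⟨by omega, le_refl _⟩, P0]
            simp
          · rw [if_neg hw, if_neg (by omega), hmGetD_empty])
        (fun w => by
          rw [hmGetD_insert]
          by_cases hw : w = finish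
          · subst hw
            rw [if_pos rfl, if_pos ⟨by omega, le_refl _⟩, P1]
            simp
          · rw [if_neg hw, if_neg (by omega), hmGetD_empty])
      rcases hk : PySem.Str.count commands "*" with _ | _ | k
      · rw [if_neg (by omega), if_neg (by omega), specVal_zero,
          hinv.2 n, if_pos ⟨by omega, by omega⟩]
      · rw [if_neg (by omega), if_pos rfl, specVal_one,
          hinv.1 n, if_pos ⟨by omega, by omega⟩]
      · rw [if_pos (by omega), specVal_big _ _ (by omega)]
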